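-- pv_equiv track=rewrite | github.com/carlzimmerman/zimmerman-formula | extended_research/biotech/z2_unified_folding_pipeline.py | _smooth_ss
-- ===== SOURCE A (Python) =====
-- def _smooth_ss(ss):
--     """Smooth secondary structure assignment."""
--     ss = list(ss)
--
--     # Require 3+ consecutive H or E
--     for state in ['H', 'E']:
--         i = 0
--         while i < len(ss):
--             if ss[i] == state:
--                 j = i
--                 while j < len(ss) and ss[j] == state:
--                     j += 1
--                 if j - i < 3:
--                     for k in range(i, j):
--                         ss[k] = 'C'
--                 i = j
--             else:
--                 i += 1
--
--     return ss
-- ===== SOURCE B (Python) =====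
-- def _flush_run(run):
--     if run and run[0] in ('H', 'E') and len(run) < 3:
--         return ['C'] * len(run)
--     return list(run)
--
-- def _smooth_ss(ss):
--     """Smooth secondary structure assignment."""
--     out = []
--     run = []
--     for ch in ss:
--         if run and ch != run[0]:
--             out.extend(_flush_run(run))
--             run = []
--         run.append(ch)
--     out.extend(_flush_run(run))
--     return out
-- ===== Notes on version B (the rewrite author's own statement) =====
-- stated objective: alternative
-- what changed: A makes two state-specific passes ('H' then 'E') over the list, scanning with indices and demoting short runs by in-place assignment; B makes one grouping pass that accumulates each maximal run of identical elements and flushes it through a single rule (short H/E runs become 'C's, everything else is kept), building a fresh output list.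
import Mathlib
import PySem

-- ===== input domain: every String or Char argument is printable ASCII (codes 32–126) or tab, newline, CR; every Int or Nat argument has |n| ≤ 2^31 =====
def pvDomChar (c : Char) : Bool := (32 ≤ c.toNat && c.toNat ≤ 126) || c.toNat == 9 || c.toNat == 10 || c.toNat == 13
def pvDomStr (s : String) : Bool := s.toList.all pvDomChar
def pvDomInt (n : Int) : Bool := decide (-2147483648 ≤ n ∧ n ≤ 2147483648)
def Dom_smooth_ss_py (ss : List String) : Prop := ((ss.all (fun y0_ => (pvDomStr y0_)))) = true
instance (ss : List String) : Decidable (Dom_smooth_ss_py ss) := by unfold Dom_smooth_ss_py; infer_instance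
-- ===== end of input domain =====

-- B replaces A's two state-specific in-place index scans with one run-grouping pass that
-- builds a fresh list, flushing each maximal run through a single rule (objective: alternative).

-- ===== PORT A =====
-- inner `while j < len(ss) and ss[j] == state: j += 1`
def runEndA (ss : List String) (state : String) (j : Nat) : Nat :=
  if h : j < ss.length then
    if ss[j] = state then runEndA ss state (j + 1) else j
  else j
termination_by ss.length - j

lemma runEndA_ge (ss : List String) (state : String) (j : Nat) : j ≤ runEndA ss state j := by
  rw [runEndA]
  split
  · split
    · exact le_trans (Nat.le_succ j) (runEndA_ge ss state (j + 1))
    · exact le_refl j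
  · exact le_refl j
termination_by ss.length - j

-- `for k in range(i, j): ss[k] = 'C'`
def setCRange (ss : List String) (i j : Nat) : List String :=
  (List.range' i (j - i)).foldl (fun s k => s.set k "C") ss

lemma foldl_set_length (l : List Nat) : ∀ ss : List String,
    (l.foldl (fun s k => s.set k "C") ss).length = ss.length := by
  induction l with
  | nil => intro ss; rfl
  | cons a t ih => intro ss; simpa [List.foldl] using ih (ss.set a "C")

lemma length_setCRange (ss : List String) (i j : Nat) :
    (setCRange ss i j).length = ss.length := foldl_set_length _ ss

-- outer `while i < len(ss)` of one `state`-pass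
def loopA (state : String) (ss : List String) (i : Nat) : List String :=
  if h : i < ss.length then
    if hs : ss[i] = state then
      let j := runEndA ss state i
      let ss' := if j - i < 3 then setCRange ss i j else ss
      loopA state ss' j
    else loopA state ss (i + 1)
  else ss
termination_by ss.length - i
decreasing_by
  · have hj : i + 1 ≤ runEndA ss state i := by
      rw [runEndA]; simp only [h, hs, dif_pos, if_pos]
      exact runEndA_ge ss state (i + 1)
    have h1 : (setCRange ss i (runEndA ss state i)).length = ss.length :=
      length_setCRange ss i (runEndA ss state i)
    split <;> omega
  · omega

-- `for state in ['H', 'E']: …`, after `ss = list(ss)`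
def smooth_ss_py (ss : List String) : List String :=
  loopA "E" (loopA "H" ss 0) 0

-- ===== PORT B =====
-- helper _flush_run
def flushB (run : List String) : List String :=
  match run with
  | [] => run
  | x :: _ => if (x = "H" ∨ x = "E") ∧ run.length < 3 then List.replicate run.length "C" else run

-- body of B's single for-loop: state (out, run)
def stepB (acc : List String × List String) (ch : String) : List String × List String :=
  match acc with
  | (out, run) =>
    match run with
    | [] => (out, run ++ [ch])
    | x :: _ => if ch ≠ x then (out ++ flushB run, [ch]) else (out, run ++ [ch])

def smooth_ss_py_alt (ss : List String) : List String :=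
  let acc := ss.foldl stepB ([], [])
  acc.1 ++ flushB acc.2

-- ===== PRECONDITION & SPEC =====
def Spec_smooth_ss_py (ss : List String) (out : List String) : Prop := out = smooth_ss_py_alt ss
instance (ss : List String) (out : List String) : Decidable (Spec_smooth_ss_py ss out) := by unfold Spec_smooth_ss_py; infer_instance

-- ===== CLAIM (what is proved, stated in full; the proofs are below) =====
def Claim_equal_smooth_ss_py : Prop := ∀ (ss : List String), Dom_smooth_ss_py ss → Spec_smooth_ss_py ss (smooth_ss_py ss)

-- ===== LEMMAS AND PROOFS =====

-- small takeWhile/dropWhile helpers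
lemma takeWhile_all (p : String → Bool) : ∀ l : List String, (∀ a ∈ l, p a = true) → l.takeWhile p = l := by
  intro l h
  induction l with
  | nil => rfl
  | cons a t ih => simp [h a (by simp), ih (fun b hb => h b (by simp [hb]))]

lemma dropWhile_all (p : String → Bool) : ∀ l : List String, (∀ a ∈ l, p a = true) → l.dropWhile p = [] := by
  intro l h
  induction l with
  | nil => rfl
  | cons a t ih => simp [h a (by simp), ih (fun b hb => h b (by simp [hb]))]

lemma takeWhile_eq_nil_head (p : String → Bool) (l : List String)
    (h : ∀ y ∈ l.head?, p y = false) : l.takeWhile p = [] := by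
  cases l with
  | nil => rfl
  | cons a t => simp [h a (by simp)]

lemma head_dropWhile (p : String → Bool) : ∀ l : List String, ∀ y ∈ (l.dropWhile p).head?, p y = false := by
  intro l
  induction l with
  | nil => simp
  | cons a t ih =>
    by_cases ha : p a
    · simpa [List.dropWhile_cons, ha] using ih
    · simp [ha]

lemma dropWhile_self_of_takeWhile_nil (p : String → Bool) (t : List String)
    (h : t.takeWhile p = []) : t.dropWhile p = t := by
  conv_rhs => rw [← List.takeWhile_append_dropWhile (p := p) (l := t)]
  rw [h]; rfl

lemma take_tw (p : String → Bool) (l : List String) :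
    l.take (l.takeWhile p).length = l.takeWhile p := by
  have h := List.take_left' (l₁ := l.takeWhile p) (l₂ := l.dropWhile p) rfl
  rwa [List.takeWhile_append_dropWhile] at h

lemma drop_tw (p : String → Bool) (l : List String) :
    l.drop (l.takeWhile p).length = l.dropWhile p := by
  have h := List.drop_left' (l₁ := l.takeWhile p) (l₂ := l.dropWhile p) rfl
  rwa [List.takeWhile_append_dropWhile] at h

-- characterisation of A's inner while loop
lemma runEndA_eq (ss : List String) (state : String) (j : Nat) :
    runEndA ss state j = j + ((ss.drop j).takeWhile (· == state)).length := by
  rw [runEndA]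
  split
  case isTrue h =>
    rw [List.drop_eq_getElem_cons h]
    split
    case isTrue hs =>
      have ih := runEndA_eq ss state (j + 1)
      simp [hs, ih]
      omega
    case isFalse hs =>
      simp [hs]
  case isFalse h =>
    have hd : ss.drop j = [] := List.drop_eq_nil_of_le (by omega)
    simp [hd]
termination_by ss.length - j

-- characterisation of the `for k in range(i, j)` assignment loop
lemma foldl_set_eq : ∀ (n i : Nat) (ss : List String), i + n ≤ ss.length →
    (List.range' i n).foldl (fun s k => s.set k "C") ss
      = ss.take i ++ List.replicate n "C" ++ ss.drop (i + n) := by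
  intro n
  induction n with
  | zero => intro i ss h; simp
  | succ n ih =>
    intro i ss h
    rw [List.range'_succ]
    simp only [List.foldl_cons]
    rw [ih (i + 1) (ss.set i "C") (by simp; omega)]
    rw [List.set_eq_take_cons_drop _ (by omega)]
    have hsplit : ss.take i ++ "C" :: ss.drop (i + 1) = (ss.take i ++ ["C"]) ++ ss.drop (i + 1) := by simp
    have hl : (ss.take i ++ ["C"]).length = i + 1 := by simp; omega
    have h1 : (ss.take i ++ "C" :: ss.drop (i + 1)).take (i + 1) = ss.take i ++ ["C"] := by
      rw [hsplit]; exact List.take_left' hl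
    have h2 : (ss.take i ++ "C" :: ss.drop (i + 1)).drop (i + 1 + n) = ss.drop (i + (n + 1)) := by
      rw [hsplit, show i + 1 + n = (ss.take i ++ ["C"]).length + n by omega,
        List.drop_length_add_append, List.drop_drop]
      congr 1; omega
    rw [h1, h2]
    simp [List.replicate_succ]

lemma setCRange_eq (ss : List String) (i j : Nat) (hij : i ≤ j) (hj : j ≤ ss.length) :
    setCRange ss i j = ss.take i ++ List.replicate (j - i) "C" ++ ss.drop j := by
  unfold setCRange
  rw [foldl_set_eq (j - i) i ss (by omega)]
  rw [show i + (j - i) = j by omega]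

-- structural behaviour of passR = one state-pass of A, run by run
def passR (state : String) : List String → List String
  | [] => []
  | x :: xs =>
    if x = state then
      (if (x :: xs.takeWhile (· == state)).length < 3
        then List.replicate (x :: xs.takeWhile (· == state)).length "C"
        else x :: xs.takeWhile (· == state)) ++ passR state (xs.dropWhile (· == state))
    else x :: passR state xs
termination_by l => l.length
decreasing_by
  · have := List.length_dropWhile_le (p := (· == state)) (l := xs); simp; omega
  · simp

-- structural run-by-run version of B
def spanF : List String → List String
  | [] => []
  | x :: xs =>
    (if (x = "H" ∨ x = "E") ∧ (x :: xs.takeWhile (· == x)).length < 3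
      then List.replicate (x :: xs.takeWhile (· == x)).length "C"
      else x :: xs.takeWhile (· == x)) ++ spanF (xs.dropWhile (· == x))
termination_by l => l.length
decreasing_by
  have := List.length_dropWhile_le (p := (· == x)) (l := xs); simp; omega

lemma passR_cons_neg (state x : String) (xs : List String) (hx : ¬ x = state) :
    passR state (x :: xs) = x :: passR state xs := by
  rw [passR]; simp [hx]

lemma passR_append (state : String) : ∀ (l t : List String), (∀ a ∈ l, ¬ a = state) →
    passR state (l ++ t) = l ++ passR state t := by
  intro l
  induction l with
  | nil => intro t _; rfl
  | cons a l' ih =>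
    intro t h
    rw [List.cons_append, passR_cons_neg state a _ (h a (by simp))]
    rw [ih t (fun b hb => h b (by simp [hb]))]
    simp

lemma passR_run (state x : String) (r' t : List String)
    (hx : x = state) (hall : ∀ a ∈ r', a = state)
    (ht : t.takeWhile (· == state) = []) :
    passR state ((x :: r') ++ t)
      = (if (x :: r').length < 3 then List.replicate (x :: r').length "C" else (x :: r')) ++ passR state t := by
  have htw : (r' ++ t).takeWhile (· == state) = r' := by
    rw [List.takeWhile_append]
    rw [takeWhile_all _ r' (by intro a ha; simp [hall a ha])]
    simp [ht]
  have hdw : (r' ++ t).dropWhile (· == state) = t := by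
    rw [List.dropWhile_append]
    rw [dropWhile_all _ r' (by intro a ha; simp [hall a ha])]
    simp [dropWhile_self_of_takeWhile_nil _ t ht]
  rw [List.cons_append, passR]
  simp [hx, htw, hdw]

lemma spanF_run (x : String) (r' t : List String)
    (hall : ∀ a ∈ r', a = x)
    (ht : t.takeWhile (· == x) = []) :
    spanF ((x :: r') ++ t) = flushB (x :: r') ++ spanF t := by
  have htw : (r' ++ t).takeWhile (· == x) = r' := by
    rw [List.takeWhile_append]
    rw [takeWhile_all _ r' (by intro a ha; simp [hall a ha])]
    simp [ht]
  have hdw : (r' ++ t).dropWhile (· == x) = t := by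
    rw [List.dropWhile_append]
    rw [dropWhile_all _ r' (by intro a ha; simp [hall a ha])]
    simp [dropWhile_self_of_takeWhile_nil _ t ht]
  rw [List.cons_append, spanF, flushB]
  simp [htw, hdw]

-- the H-pass never puts an "E" at the front
lemma passR_H_headE : ∀ t : List String, (∀ y ∈ t.head?, (y == "E") = false) →
    ∀ y ∈ (passR "H" t).head?, (y == "E") = false := by
  intro t h
  cases t with
  | nil => simp [passR]
  | cons a t' =>
    by_cases ha : a = "H"
    · subst ha
      rw [passR, if_pos rfl]
      split
      · simp [List.replicate_succ, List.cons_append]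
      · simp [List.cons_append]
    · rw [passR_cons_neg _ _ _ ha]
      simpa using h a (by simp)

-- main run-by-run lemma: the two passes of A compose to B's single grouping pass
lemma passHE_eq_spanF : ∀ (n : Nat) (ss : List String), ss.length ≤ n →
    passR "E" (passR "H" ss) = spanF ss := by
  intro n
  induction n with
  | zero =>
    intro ss h
    have : ss = [] := List.eq_nil_of_length_eq_zero (by omega)
    subst this
    simp [passR, spanF]
  | succ n ih =>
    intro ss h
    cases ss with
    | nil => simp [passR, spanF]
    | cons x xs =>
      have hsplit : x :: xs = (x :: xs.takeWhile (· == x)) ++ xs.dropWhile (· == x) := by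
        simp [List.takeWhile_append_dropWhile]
      have halltw : ∀ a ∈ xs.takeWhile (· == x), a = x := by
        intro a ha
        have := List.mem_takeWhile_imp ha
        simpa using this
      have hdwhead : ∀ y ∈ (xs.dropWhile (· == x)).head?, (y == x) = false :=
        head_dropWhile _ xs
      have hdwlen : (xs.dropWhile (· == x)).length ≤ n := by
        have := List.length_dropWhile_le (p := (· == x)) (l := xs)
        simp at h; omega
      have hspan : spanF (x :: xs) = flushB (x :: xs.takeWhile (· == x)) ++ spanF (xs.dropWhile (· == x)) := by
        conv_lhs => rw [hsplit]
        exact spanF_run x _ _ halltw (takeWhile_eq_nil_head _ _ hdwhead)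
      by_cases hH : x = "H"
      · subst hH
        have h1 : passR "H" ("H" :: xs)
            = (if ("H" :: xs.takeWhile (· == "H")).length < 3
                then List.replicate ("H" :: xs.takeWhile (· == "H")).length "C"
                else ("H" :: xs.takeWhile (· == "H"))) ++ passR "H" (xs.dropWhile (· == "H")) := by
          conv_lhs => rw [hsplit]
          exact passR_run "H" "H" _ _ rfl halltw (takeWhile_eq_nil_head _ _ hdwhead)
        rw [h1, passR_append "E" _ _ ?hne, ih _ hdwlen, hspan, flushB]
        · simp
        case hne =>
          intro a ha
          split at ha
          · have := List.eq_of_mem_replicate ha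
            simp [this]
          · simp at ha
            rcases ha with ha | ha
            · simp [ha]
            · simp [halltw a ha]
      · by_cases hE : x = "E"
        · subst hE
          have h1 : passR "H" ("E" :: xs)
              = ("E" :: xs.takeWhile (· == "E")) ++ passR "H" (xs.dropWhile (· == "E")) := by
            conv_lhs => rw [hsplit]
            apply passR_append
            intro a ha
            simp at ha
            rcases ha with ha | ha
            · simp [ha]
            · simp [halltw a ha]
          have hheadE : (passR "H" (xs.dropWhile (· == "E"))).takeWhile (· == "E") = [] :=
            takeWhile_eq_nil_head _ _ (passR_H_headE _ hdwhead)
          rw [h1, passR_run "E" "E" _ _ rfl halltw hheadE, ih _ hdwlen, hspan, flushB]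
          simp
        · have h1 : passR "H" (x :: xs)
              = (x :: xs.takeWhile (· == x)) ++ passR "H" (xs.dropWhile (· == x)) := by
            conv_lhs => rw [hsplit]
            apply passR_append
            intro a ha
            simp at ha
            rcases ha with ha | ha
            · simp [ha, hH]
            · rw [halltw a ha]; exact hH
          have h2 : passR "E" ((x :: xs.takeWhile (· == x)) ++ passR "H" (xs.dropWhile (· == x)))
              = (x :: xs.takeWhile (· == x)) ++ passR "E" (passR "H" (xs.dropWhile (· == x))) := by
            apply passR_append
            intro a ha
            simp at ha
            rcases ha with ha | ha
            · simp [ha, hE]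
            · rw [halltw a ha]; exact hE
          rw [h1, h2, ih _ hdwlen, hspan, flushB]
          simp [hH, hE]

-- A's outer while loop computes passR on the unprocessed suffix
lemma loopA_eq : ∀ (N : Nat) (state : String) (ss : List String) (i : Nat), ss.length - i ≤ N →
    loopA state ss i = ss.take i ++ passR state (ss.drop i) := by
  intro N
  induction N with
  | zero =>
    intro state ss i hN
    rw [loopA, dif_neg (by omega)]
    have hd : ss.drop i = [] := List.drop_eq_nil_of_le (by omega)
    simp [hd, passR, List.take_of_length_le (show ss.length ≤ i by omega)]
  | succ N ih =>
    intro state ss i hN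
    rw [loopA]
    by_cases h : i < ss.length
    · rw [dif_pos h]
      have hdropcons : ss.drop i = ss[i] :: ss.drop (i + 1) := List.drop_eq_getElem_cons h
      by_cases hs : ss[i] = state
      · rw [dif_pos hs]
        have hje : runEndA ss state i = i + ((ss.drop i).takeWhile (· == state)).length :=
          runEndA_eq ss state i
        have htwcons : (ss.drop i).takeWhile (· == state) = ss[i] :: (ss.drop (i + 1)).takeWhile (· == state) := by
          rw [hdropcons, List.takeWhile_cons]; simp [hs]
        have hdweq : (ss.drop i).dropWhile (· == state) = (ss.drop (i + 1)).dropWhile (· == state) := by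
          rw [hdropcons, List.dropWhile_cons]; simp [hs]
        have hn1 : 1 ≤ ((ss.drop i).takeWhile (· == state)).length := by
          rw [htwcons]; simp
        have hnle : ((ss.drop i).takeWhile (· == state)).length ≤ ss.length - i := by
          have h1 := (List.takeWhile_sublist (· == state) (l := ss.drop i)).length_le
          simpa using h1
        have hpass : passR state (ss.drop i)
            = (if ((ss.drop i).takeWhile (· == state)).length < 3
                then List.replicate ((ss.drop i).takeWhile (· == state)).length "C"
                else (ss.drop i).takeWhile (· == state)) ++ passR state ((ss.drop i).dropWhile (· == state)) := by
          conv_lhs => rw [hdropcons]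
          rw [passR, if_pos hs, htwcons, hdweq]
        have hdropj : ss.drop (i + ((ss.drop i).takeWhile (· == state)).length)
            = (ss.drop i).dropWhile (· == state) := by
          rw [← List.drop_drop, drop_tw]
        have htakej : ss.take (i + ((ss.drop i).takeWhile (· == state)).length)
            = ss.take i ++ (ss.drop i).takeWhile (· == state) := by
          rw [List.take_add, take_tw]
        set n := ((ss.drop i).takeWhile (· == state)).length with hn
        simp only [hje]
        rw [show i + n - i = n by omega]
        by_cases hlt : n < 3
        · rw [if_pos hlt]
          rw [setCRange_eq ss i (i + n) (by omega) (by omega)]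
          rw [show i + n - i = n by omega]
          have hLlen : (ss.take i ++ List.replicate n "C").length = i + n := by
            simp; omega
          have hassoc : ss.take i ++ List.replicate n "C" ++ ss.drop (i + n)
              = (ss.take i ++ List.replicate n "C") ++ ss.drop (i + n) := by simp
          have hLfull : (ss.take i ++ List.replicate n "C" ++ ss.drop (i + n)).length = ss.length := by
            simp; omega
          rw [ih state _ (i + n) (by rw [hLfull]; omega)]
          rw [hassoc, List.take_left' hLlen, List.drop_left' hLlen]
          rw [hdropj, hpass, if_pos hlt]
          simp
        · rw [if_neg hlt]
          rw [ih state ss (i + n) (by omega)]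
          rw [htakej, hdropj, hpass, if_neg hlt]
          simp
      · rw [dif_neg hs]
        rw [ih state ss (i + 1) (by omega)]
        conv_rhs => rw [hdropcons]
        rw [passR_cons_neg state _ _ hs]
        have ht1 : List.take (i + 1) ss = List.take i ss ++ [ss[i]] := by
          rw [List.take_add_one, List.getElem?_eq_getElem h]
          rfl
        rw [ht1, List.append_assoc, List.singleton_append]
    · rw [dif_neg h]
      have hd : ss.drop i = [] := List.drop_eq_nil_of_le (by omega)
      simp [hd, passR, List.take_of_length_le (show ss.length ≤ i by omega)]

lemma loopA_zero (state : String) (ss : List String) : loopA state ss 0 = passR state ss := by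
  have := loopA_eq ss.length state ss 0 (by omega)
  simpa using this

-- B's foldl with a nonempty uniform pending run
lemma foldB_eq : ∀ (l res : List String) (x : String) (rr : List String),
    (∀ a ∈ rr, a = x) →
    (l.foldl stepB (res, x :: rr)).1 ++ flushB (l.foldl stepB (res, x :: rr)).2
      = res ++ spanF ((x :: rr) ++ l) := by
  intro l
  induction l with
  | nil =>
    intro res x rr hall
    simp only [List.foldl_nil]
    have : spanF ((x :: rr) ++ []) = flushB (x :: rr) := by
      rw [List.append_nil]
      rw [spanF, flushB]
      rw [takeWhile_all _ rr (by intro a ha; simp [hall a ha])]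
      rw [dropWhile_all _ rr (by intro a ha; simp [hall a ha])]
      simp [spanF]
    rw [this]
  | cons ch l' ih =>
    intro res x rr hall
    simp only [List.foldl_cons]
    by_cases hch : ch = x
    · have hstep : stepB (res, x :: rr) ch = (res, x :: (rr ++ [ch])) := by
        simp [stepB, hch]
      rw [hstep, ih res x (rr ++ [ch]) ?hu]
      · congr 2
        simp
      case hu =>
        intro a ha
        simp at ha
        rcases ha with ha | ha
        · exact hall a ha
        · simp [ha, hch]
    · have hstep : stepB (res, x :: rr) ch = (res ++ flushB (x :: rr), [ch]) := by
        simp [stepB, hch]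
      rw [hstep, ih (res ++ flushB (x :: rr)) ch [] (by simp)]
      rw [spanF_run x rr (ch :: l') hall (by simp [hch])]
      simp

lemma alt_eq_spanF (ss : List String) : smooth_ss_py_alt ss = spanF ss := by
  unfold smooth_ss_py_alt
  cases ss with
  | nil => simp [flushB, spanF]
  | cons x xs =>
    simp only [List.foldl_cons]
    have hstep : stepB ([], []) x = ([], [x]) := rfl
    rw [hstep]
    have := foldB_eq xs [] x [] (by simp)
    simpa using this

-- ===== VERDICT (by name: the statement is the Claim_ definition above) =====
theorem smooth_ss_py_spec : Claim_equal_smooth_ss_py := by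
  intro ss _
  unfold Spec_smooth_ss_py smooth_ss_py
  rw [loopA_zero, loopA_zero, passHE_eq_spanF ss.length ss (le_refl _), alt_eq_spanF]
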